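-- pv_equiv track=rewrite | github.com/lautaro-b/shop_advisor_xml | ex5.py | sum_basket
-- ===== SOURCE A (Python) =====
-- def sum_basket(price_list):
--     '''
--     Receives a list of prices
--     Returns a tuple - the sum of the list (when ignoring Nones)
--       and the number of missing items (Number of Nones)
--
--     '''
--     missing_items = 0
--     sum_price_list = 0
--     for index in price_list:
--         if index is None:
--             missing_items += 1
--         else: sum_price_list += index
--     return sum_price_list, missing_items
-- ===== SOURCE B (Python) =====
-- def sum_basket(price_list):
--     missing_items = price_list.count(None)
--     sum_price_list = sum(x for x in price_list if x is not None)
--     return sum_price_list, missing_items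
-- ===== Notes on version B (the rewrite author's own statement) =====
-- stated objective: simpler
-- what changed: Replaces the single accumulating loop with two independent passes: list.count(None) for the missing count and a filtered sum for the total.
import Mathlib
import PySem

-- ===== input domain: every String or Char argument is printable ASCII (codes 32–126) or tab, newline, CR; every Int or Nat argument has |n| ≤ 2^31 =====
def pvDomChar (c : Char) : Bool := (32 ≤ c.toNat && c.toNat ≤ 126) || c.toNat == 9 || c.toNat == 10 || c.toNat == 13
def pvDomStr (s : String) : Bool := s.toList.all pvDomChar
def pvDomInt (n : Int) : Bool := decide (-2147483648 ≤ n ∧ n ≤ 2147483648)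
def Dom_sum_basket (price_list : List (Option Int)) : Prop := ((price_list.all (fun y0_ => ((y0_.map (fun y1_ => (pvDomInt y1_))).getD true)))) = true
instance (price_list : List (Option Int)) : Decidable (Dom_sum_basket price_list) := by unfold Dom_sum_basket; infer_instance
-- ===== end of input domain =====

-- B computes the same tuple via two independent passes (count of None, filtered sum) instead of one accumulating loop; same cost, simpler decomposition.


-- ===== PORT A =====
-- literal port of A: one loop over the list carrying (missing_items, sum_price_list)
def sum_basket (price_list : List (Option Int)) : Int × Int :=
  let st := price_list.foldl (fun (acc : Int × Int) index =>
    match index with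
    | none => (acc.1 + 1, acc.2)
    | some v => (acc.1, acc.2 + v)) (0, 0)
  (st.2, st.1)

-- ===== PORT B =====
-- port of B: two independent passes — count of none, then sum of the filtered values
def sum_basket_alt (price_list : List (Option Int)) : Int × Int :=
  let missing_items : Int := PySem.List.count price_list none
  let sum_price_list : Int := (price_list.filterMap id).sum
  (sum_price_list, missing_items)

-- ===== PRECONDITION & SPEC =====
def Spec_sum_basket (price_list : List (Option Int)) (out : Int × Int) : Prop := out = sum_basket_alt price_list
instance (price_list : List (Option Int)) (out : Int × Int) : Decidable (Spec_sum_basket price_list out) := by unfold Spec_sum_basket; infer_instance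

-- ===== CLAIM (what is proved, stated in full; the proofs are below) =====
def Claim_equal_sum_basket : Prop := ∀ (price_list : List (Option Int)), Dom_sum_basket price_list → Spec_sum_basket price_list (sum_basket price_list)

-- ===== LEMMAS AND PROOFS =====

-- ===== VERDICT (by name: the statement is the Claim_ definition above) =====
theorem sum_basket_foldl (l : List (Option Int)) (m s : Int) :
    l.foldl (fun (acc : Int × Int) index =>
      match index with
      | none => (acc.1 + 1, acc.2)
      | some v => (acc.1, acc.2 + v)) (m, s)
    = (m + PySem.List.count l none, s + (l.filterMap id).sum) := by
  induction l generalizing m s with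
  | nil => simp [PySem.List.count]
  | cons h t ih =>
    cases h <;> simp [PySem.List.count, ih] <;> ring_nf

theorem sum_basket_spec : Claim_equal_sum_basket := by
  intro l _
  unfold Spec_sum_basket sum_basket sum_basket_alt
  simp [sum_basket_foldl]
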